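-- pv_equiv track=rewrite | github.com/codeWithUtkarsh/tsp-quantum-algorithm | src/DecodeBitstringTSP.py | generate_city_sequences
-- ===== SOURCE A (Python) =====
-- def generate_city_sequences(input_list, num_nodes):
--     def backtrack(position, current_path):
--         if position == len(input_list):
--             # Fill in any missing nodes
--             used_nodes = set(current_path)
--             missing_nodes = [i for i in range(num_nodes) if i not in used_nodes]
--             return [current_path + sorted(missing_nodes)]
--
--         results = []
--         choices = input_list[position]
--
--         # Convert single integer to list for uniform processing
--         if isinstance(choices, int):
--             choices = [choices]
--
--         # Find valid choices (not already used)
--         used_nodes = set(current_path)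
--         valid_choices = [choice for choice in choices if choice not in used_nodes]
--
--         # If no valid choices from original list, use all remaining nodes
--         if not valid_choices and choices:
--             # Check if any original choices were already used
--             if any(choice in used_nodes for choice in choices):
--                 remaining_nodes = [i for i in range(num_nodes) if i not in used_nodes]
--                 valid_choices = remaining_nodes
--
--         # If still no valid choices, terminate this path and fill missing
--         if not valid_choices:
--             missing_nodes = [i for i in range(num_nodes) if i not in used_nodes]
--             return [current_path + sorted(missing_nodes)]
--
--         # Explore each valid choice
--         for choice in valid_choices:
--             if choice not in current_path:  # Extra safety check
--                 results.extend(backtrack(position + 1, current_path + [choice]))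
--
--         return results
--
--     return backtrack(0, [])
-- ===== SOURCE B (Python) =====
-- def generate_city_sequences(input_list, num_nodes):
--     # Level-by-level frontier expansion instead of recursion: each frame is
--     # (finished, path); finished frames are carried along so the final output
--     # keeps the original DFS pre-order.
--     frontier = [(False, [])]
--     for choices in input_list:
--         if isinstance(choices, int):
--             choices = [choices]
--         nxt = []
--         for done, path in frontier:
--             if done:
--                 nxt.append((True, path))
--                 continue
--             used = set(path)
--             valid = [c for c in choices if c not in used]
--             if not valid and choices:
--                 valid = [i for i in range(num_nodes) if i not in used]
--             if not valid:
--                 nxt.append((True, path + [i for i in range(num_nodes) if i not in used]))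
--             else:
--                 nxt.extend((False, path + [c]) for c in valid)
--         frontier = nxt
--     return [path if done else path + [i for i in range(num_nodes) if i not in set(path)]
--             for done, path in frontier]
-- ===== Notes on version B (the rewrite author's own statement) =====
-- stated objective: alternative
-- what changed: Replaces the recursive pre-order backtracking with an iterative level-by-level frontier fold over input_list that carries finished paths along in place, so the DFS output order falls out of the frontier order with no recursion or stack.
import Mathlib
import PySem

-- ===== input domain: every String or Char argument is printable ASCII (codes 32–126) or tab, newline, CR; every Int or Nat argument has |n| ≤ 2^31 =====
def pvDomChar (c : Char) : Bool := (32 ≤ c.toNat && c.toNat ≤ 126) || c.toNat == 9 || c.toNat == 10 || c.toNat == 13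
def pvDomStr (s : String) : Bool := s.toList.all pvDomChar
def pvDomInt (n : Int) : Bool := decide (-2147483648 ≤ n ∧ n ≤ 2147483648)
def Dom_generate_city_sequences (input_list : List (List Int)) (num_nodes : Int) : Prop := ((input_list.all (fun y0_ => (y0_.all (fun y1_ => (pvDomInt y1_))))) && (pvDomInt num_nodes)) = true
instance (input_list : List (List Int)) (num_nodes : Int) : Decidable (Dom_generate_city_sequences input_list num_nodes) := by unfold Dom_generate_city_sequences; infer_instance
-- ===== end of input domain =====

-- B replaces the recursive backtracking with a level-by-level frontier fold over input_list (alternative decomposition, same cost).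

-- ===== PORT A =====
-- inner helper `backtrack(position, current_path)` of A
def gcsBacktrack (input_list : List (List Int)) (num_nodes : Int) (position : Nat) (current_path : List Int) : List (List Int) :=
  if position = input_list.length then
    let used_nodes := PySem.Set.ofList current_path
    let missing_nodes := (PySem.List.pyRange 0 num_nodes 1).filter (fun i => !(PySem.Set.contains used_nodes i))
    [current_path ++ PySem.List.sorted missing_nodes (fun x => x) false]
  else
    -- choices = input_list[position]; every call from the initial backtrack(0, []) has position < len
    -- (the isinstance(choices, int) branch is vacuous under the type List (List Int))
    if h : position < input_list.length then
      let choices := input_list[position]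
      let used_nodes := PySem.Set.ofList current_path
      let valid_choices := choices.filter (fun c => !(PySem.Set.contains used_nodes c))
      let valid_choices2 :=
        if valid_choices = [] ∧ choices ≠ [] then
          (if choices.any (fun c => PySem.Set.contains used_nodes c) then
            (PySem.List.pyRange 0 num_nodes 1).filter (fun i => !(PySem.Set.contains used_nodes i))
          else valid_choices)
        else valid_choices
      if valid_choices2 = [] then
        let missing_nodes := (PySem.List.pyRange 0 num_nodes 1).filter (fun i => !(PySem.Set.contains used_nodes i))
        [current_path ++ PySem.List.sorted missing_nodes (fun x => x) false]
      else
        valid_choices2.foldl (fun results choice =>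
          if !(current_path.contains choice) then
            results ++ gcsBacktrack input_list num_nodes (position + 1) (current_path ++ [choice])
          else results) []
    else []  -- unreachable from backtrack(0, []): Python would raise IndexError here
termination_by input_list.length - position
decreasing_by omega

def generate_city_sequences (input_list : List (List Int)) (num_nodes : Int) : List (List Int) :=
  gcsBacktrack input_list num_nodes 0 []

-- ===== PORT B =====
-- the children a frame (done, path) contributes at a level with the given choices
def gcsExpand (num_nodes : Int) (choices : List Int) (f : Bool × List Int) : List (Bool × List Int) :=
  match f with
  | (true, path) => [(true, path)]
  | (false, path) =>
    let used := PySem.Set.ofList path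
    let valid0 := choices.filter (fun c => !(PySem.Set.contains used c))
    let valid :=
      if valid0 = [] ∧ choices ≠ [] then
        (PySem.List.pyRange 0 num_nodes 1).filter (fun i => !(PySem.Set.contains used i))
      else valid0
    if valid = [] then
      [(true, path ++ (PySem.List.pyRange 0 num_nodes 1).filter (fun i => !(PySem.Set.contains used i)))]
    else
      valid.map (fun c => (false, path ++ [c]))

def generate_city_sequences_alt (input_list : List (List Int)) (num_nodes : Int) : List (List Int) :=
  (input_list.foldl (fun frontier choices => frontier.flatMap (gcsExpand num_nodes choices)) [(false, [])]).map
    (fun f => if f.1 then f.2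
      else f.2 ++ (PySem.List.pyRange 0 num_nodes 1).filter (fun i => !(PySem.Set.contains (PySem.Set.ofList f.2) i)))

-- ===== PRECONDITION & SPEC =====
def Spec_generate_city_sequences (input_list : List (List Int)) (num_nodes : Int) (out : List (List Int)) : Prop := out = generate_city_sequences_alt input_list num_nodes
instance (input_list : List (List Int)) (num_nodes : Int) (out : List (List Int)) : Decidable (Spec_generate_city_sequences input_list num_nodes out) := by unfold Spec_generate_city_sequences; infer_instance

-- ===== CLAIM (what is proved, stated in full; the proofs are below) =====
def Claim_equal_generate_city_sequences : Prop := ∀ (input_list : List (List Int)) (num_nodes : Int), Dom_generate_city_sequences input_list num_nodes → Spec_generate_city_sequences input_list num_nodes (generate_city_sequences input_list num_nodes)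

-- ===== LEMMAS AND PROOFS =====

-- the missing-nodes filter is strictly increasing, so Python's sorted() leaves it unchanged
lemma gcs_sorted_missing (n : Int) (p : List Int) :
    PySem.List.sorted ((PySem.List.pyRange 0 n 1).filter (fun i => !decide (i ∈ p))) (fun x => x) false
      = (PySem.List.pyRange 0 n 1).filter (fun i => !decide (i ∈ p)) := by
  apply PySem.List.sorted_eq_self_of_pairwise
  exact ((PySem.List.pairwise_lt_pyRange_one 0 n).filter _).imp (fun h => le_of_lt h)


-- the value of A's backtrack seen from a frame of B's frontier
def gcsRun (input_list : List (List Int)) (num_nodes : Int) (pos : Nat) (f : Bool × List Int) : List (List Int) :=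
  match f with
  | (true, p) => [p]
  | (false, p) => gcsBacktrack input_list num_nodes pos p

-- membership in the set built from current_path is list membership
lemma gcs_contains (p : List Int) (c : Int) :
    PySem.Set.contains (PySem.Set.ofList p) c = p.contains c := by
  simp [PySem.Set.contains, PySem.Set.mem_ofList]

-- one level of B's expansion, seen from position pos, is one unfolding of A's backtrack
lemma gcs_step (il : List (List Int)) (n : Int) (pos : Nat) (h : pos < il.length)
    (f : Bool × List Int) :
    (gcsExpand n il[pos] f).flatMap (gcsRun il n (pos + 1)) = gcsRun il n pos f := by
  obtain ⟨done, p⟩ := f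
  cases done with
  | true => simp [gcsExpand, gcsRun]
  | false =>
    show (gcsExpand n il[pos] (false, p)).flatMap (gcsRun il n (pos + 1))
        = gcsBacktrack il n pos p
    rw [gcsBacktrack, if_neg (show ¬ pos = il.length by omega), dif_pos h]
    simp only [gcsExpand]
    by_cases hc : (il[pos]).filter (fun c => !(PySem.Set.contains (PySem.Set.ofList p) c)) = [] ∧ il[pos] ≠ []
    · have hany : (il[pos]).any (fun c => PySem.Set.contains (PySem.Set.ofList p) c) = true := by
        obtain ⟨c, hcm⟩ := List.exists_mem_of_ne_nil _ hc.2
        have hfc := List.filter_eq_nil_iff.mp hc.1 c hcm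
        simp only [Bool.not_eq_eq_eq_not, Bool.not_true] at hfc
        exact List.any_eq_true.mpr ⟨c, hcm, by simpa using hfc⟩
      rw [if_pos hc, if_pos hc, if_pos hany]
      by_cases hv : (PySem.List.pyRange 0 n 1).filter (fun i => !(PySem.Set.contains (PySem.Set.ofList p) i)) = []
      · rw [if_pos hv, if_pos hv]
        simp [gcsRun, gcs_sorted_missing]
      · rw [if_neg hv, if_neg hv]
        have hmem : ∀ c ∈ (PySem.List.pyRange 0 n 1).filter (fun i => !(PySem.Set.contains (PySem.Set.ofList p) i)),
            (!(p.contains c)) = true := by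
          intro c hcm
          have := List.of_mem_filter hcm
          rwa [gcs_contains] at this
        rw [PySem.List.foldl_congr_mem' _ _
          (fun results choice => results ++ gcsBacktrack il n (pos + 1) (p ++ [choice])) _
          (by intro x hx acc; rw [if_pos (hmem x hx)])]
        rw [PySem.List.foldl_append_eq_flatMap]
        simp [gcsRun, List.flatMap_map]
    · rw [if_neg hc, if_neg hc]
      by_cases hv : (il[pos]).filter (fun c => !(PySem.Set.contains (PySem.Set.ofList p) c)) = []
      · rw [if_pos hv, if_pos hv]
        simp [gcsRun, gcs_sorted_missing]
      · rw [if_neg hv, if_neg hv]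
        have hmem : ∀ c ∈ (il[pos]).filter (fun c => !(PySem.Set.contains (PySem.Set.ofList p) c)),
            (!(p.contains c)) = true := by
          intro c hcm
          have := List.of_mem_filter hcm
          rwa [gcs_contains] at this
        rw [PySem.List.foldl_congr_mem' _ _
          (fun results choice => results ++ gcsBacktrack il n (pos + 1) (p ++ [choice])) _
          (by intro x hx acc; rw [if_pos (hmem x hx)])]
        rw [PySem.List.foldl_append_eq_flatMap]
        simp [gcsRun, List.flatMap_map]


lemma gcs_frontier (il : List (List Int)) (n : Int) (k : Nat) (pos : Nat)
    (hk : il.length - pos = k) (hpos : pos ≤ il.length) (F : List (Bool × List Int)) :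
    ((il.drop pos).foldl (fun fr ch => fr.flatMap (gcsExpand n ch)) F).map
        (fun f => if f.1 then f.2
          else f.2 ++ (PySem.List.pyRange 0 n 1).filter (fun i => !(PySem.Set.contains (PySem.Set.ofList f.2) i)))
      = F.flatMap (gcsRun il n pos) := by
  induction k generalizing pos F with
  | zero =>
    have hpe : pos = il.length := by omega
    subst hpe
    simp only [List.drop_length, List.foldl_nil]
    induction F with
    | nil => simp
    | cons f F ihF =>
      obtain ⟨done, q⟩ := f
      simp only [List.map_cons, List.flatMap_cons]
      rw [ihF]
      cases done with
      | true => rfl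
      | false =>
        simp only [gcsRun]
        rw [gcsBacktrack, if_pos rfl]
        simp [gcs_sorted_missing]
  | succ k IH =>
    have hlt : pos < il.length := by omega
    rw [List.drop_eq_getElem_cons hlt, List.foldl_cons,
      IH (pos + 1) (by omega) (by omega), List.flatMap_assoc]
    exact congrArg (fun g => List.flatMap g F) (funext (fun f => gcs_step il n pos hlt f))


-- ===== VERDICT (by name: the statement is the Claim_ definition above) =====
theorem generate_city_sequences_spec : Claim_equal_generate_city_sequences := by
  intro il n _
  show _ = _
  unfold generate_city_sequences generate_city_sequences_alt
  have h := gcs_frontier il n il.length 0 (by omega) (by omega) [(false, [])]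
  simp only [List.drop_zero] at h
  rw [h]
  simp [gcsRun]
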